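-- pv_equiv track=rewrite | github.com/yongunt/problems | vowel_skewers/vowel_skewers.py | is_authentic_skewer
-- ===== SOURCE A (Python) =====
-- from string import ascii_lowercase as ALPHABET
--
-- VOWELS = "aeiou"
--
-- def start_end(seq:str) -> bool:
--     if (seq[0].lower() not in VOWELS) and (seq[-1].lower() not in VOWELS): return True
--     return False
--
-- def vowel_order(seq:str) -> bool:
--     seq = ''.join([i for i in seq if i != '-'])
--
--     for i in range(1, len(seq)):
--         if ((seq[i-1].lower() in VOWELS) and (seq[i].lower() in VOWELS)) or ((seq[i-1].lower() not in VOWELS) and (seq[i].lower() not in VOWELS)): return False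
--     return True
--
-- def skewer_count(seq:str) -> bool:
--     skewer_count:int = 0
--     holder:list = []
--
--     for i in range(len(seq)):
--         if seq[i].lower() in ALPHABET:
--             for j in range(i + 1, len(seq)):
--                 if seq[j] == '-': skewer_count+=1
--                 if seq[j].lower() in ALPHABET:
--                     holder.append(skewer_count)
--                     skewer_count = 0
--                     break
--
--     for i in holder[1::]:
--         if holder[0] != i: return False
--
--     return True
--
-- def is_authentic_skewer(seq:str) -> bool:
--     flag:bool = True
--     for i in seq:
--         if i.lower() in ALPHABET: flag = False
--     if flag: return False
--
--     if '-' not in seq: return False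
--
--     if start_end(seq) and vowel_order(seq) and skewer_count(seq): return True
--
--     return False
-- ===== SOURCE B (Python) =====
-- from string import ascii_lowercase as ALPHABET
--
-- VOWELS = "aeiou"
--
-- def is_authentic_skewer(seq: str) -> bool:
--     # One pass: collect the dash-stripped chars, the dash-count gaps between
--     # consecutive letters, and whether any letter / any dash was seen.
--     stripped = []
--     gaps = []
--     dashes = 0
--     seen_letter = False
--     has_dash = False
--     for c in seq:
--         if c == '-':
--             dashes += 1
--             has_dash = True
--         else:
--             stripped.append(c)
--         if c.lower() in ALPHABET:
--             if seen_letter: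
--                 gaps.append(dashes)
--             dashes = 0
--             seen_letter = True
--     if not seen_letter or not has_dash:
--         return False
--     if seq[0].lower() in VOWELS or seq[-1].lower() in VOWELS:
--         return False
--     for a, b in zip(stripped, stripped[1:]):
--         if (a.lower() in VOWELS) == (b.lower() in VOWELS):
--             return False
--     return len(set(gaps)) <= 1
-- ===== Notes on version B (the rewrite author's own statement) =====
-- stated objective: simpler
-- what changed: A makes four separate passes (a letter-flag loop, a dash membership test, helper passes for the end characters and vowel alternation, and a nested index scan that re-walks the tail after every letter to count dashes); B collects the dash-stripped characters, the dash-count gaps between consecutive letters and the letter/dash flags in one single left-to-right pass, then checks the rules on those, comparing the gap list via len(set(gaps)) <= 1.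
import Mathlib
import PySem

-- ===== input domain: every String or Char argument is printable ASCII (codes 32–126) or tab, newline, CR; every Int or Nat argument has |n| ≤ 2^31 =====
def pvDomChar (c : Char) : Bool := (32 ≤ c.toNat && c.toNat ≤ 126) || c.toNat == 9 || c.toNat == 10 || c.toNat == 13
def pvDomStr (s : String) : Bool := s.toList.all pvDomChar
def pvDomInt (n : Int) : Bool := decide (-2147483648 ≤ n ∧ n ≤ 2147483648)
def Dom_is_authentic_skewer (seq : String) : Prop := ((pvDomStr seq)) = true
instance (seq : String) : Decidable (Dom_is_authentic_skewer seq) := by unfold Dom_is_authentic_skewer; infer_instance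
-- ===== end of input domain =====

-- B replaces A's quadratic nested index scans and per-rule helper passes by one
-- single pass over the string that collects the dash-stripped characters, the
-- dash-count gaps between consecutive letters and the letter/dash flags (objective: simpler).

-- ===== PORT A =====
-- Shared char helpers: both Pythons test 'c.lower() in ALPHABET' / 'c.lower() in VOWELS'
-- (a 1-char needle in a str: substring test = character membership).
def pyIsLetter (c : Char) : Bool := "abcdefghijklmnopqrstuvwxyz".toList.contains (PySem.Chars.lowerChar c)
def pyIsVowel (c : Char) : Bool := "aeiou".toList.contains (PySem.Chars.lowerChar c)

def start_end (l : List Char) : Bool :=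
  match PySem.List.pyGet? l 0, PySem.List.pyGet? l (-1) with
  | some a, some b => if (!pyIsVowel a) && (!pyIsVowel b) then true else false
  | _, _ => false  -- unreachable: Python's seq[0] raises on "", but start_end is only called with '-' ∈ seq

def vowel_order (l : List Char) : Bool :=
  let s := l.filter (fun c => !(c == '-'))
  (PySem.List.pyRange 1 (s.length : Int) 1).all (fun i =>
    !((pyIsVowel (PySem.List.pyGetD s (i-1) ' ') && pyIsVowel (PySem.List.pyGetD s i ' ')) ||
      (!pyIsVowel (PySem.List.pyGetD s (i-1) ' ') && !pyIsVowel (PySem.List.pyGetD s i ' '))))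

-- the inner 'for j in range(i+1, len(seq))' of skewer_count, run on the tail after position i:
-- counts dashes, stops at the first letter (some = appended gap; also returns the running count)
def innerScan : List Char → Int → Option Int × Int
  | [], c => (none, c)
  | ch :: rest, c =>
    let c' := if ch == '-' then c + 1 else c
    if pyIsLetter ch then (some c', c') else innerScan rest c'

-- the outer 'for i in range(len(seq))' of skewer_count: at each letter, scan the tail
def skloop : List Char → Int → List Int → List Int
  | [], _, holder => holder
  | ch :: rest, cnt, holder =>
    if pyIsLetter ch then
      match innerScan rest cnt with
      | (some g, _) => skloop rest 0 (holder ++ [g])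
      | (none, c') => skloop rest c' holder
    else skloop rest cnt holder

def skewer_count (l : List Char) : Bool :=
  let holder := skloop l 0 []
  match holder with
  | [] => true
  | h0 :: hs => hs.all (fun i => h0 == i)

def is_authentic_skewer (seq : String) : Bool :=
  let l := seq.toList
  let flag := l.foldl (fun f i => if pyIsLetter i then false else f) true
  if flag then false
  else if (l.contains '-') = false then false   -- "'-' not in seq": 1-char needle = char membership
  else if start_end l && vowel_order l && skewer_count l then true
  else false

-- ===== PORT B =====
-- one step of B's single loop; state = (stripped, gaps, dashes, seen_letter, has_dash)
def bstep (st : List Char × List Int × Int × Bool × Bool) (c : Char) :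
    List Char × List Int × Int × Bool × Bool :=
  let stripped := st.1
  let gaps := st.2.1
  let dashes := st.2.2.1
  let seen := st.2.2.2.1
  let hasDash := st.2.2.2.2
  let stripped' := if c == '-' then stripped else stripped ++ [c]
  let dashes' := if c == '-' then dashes + 1 else dashes
  let hasDash' := if c == '-' then true else hasDash
  if pyIsLetter c then
    (stripped', (if seen then gaps ++ [dashes'] else gaps), 0, true, hasDash')
  else (stripped', gaps, dashes', seen, hasDash')

def is_authentic_skewer_alt (seq : String) : Bool :=
  let l := seq.toList
  let st := l.foldl bstep ([], [], 0, false, false)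
  let stripped := st.1
  let gaps := st.2.1
  let seen := st.2.2.2.1
  let hasDash := st.2.2.2.2
  if !seen || !hasDash then false
  else if pyIsVowel (PySem.List.pyGetD l 0 ' ') || pyIsVowel (PySem.List.pyGetD l (-1) ' ') then false
  else if !((stripped.zip (stripped.drop 1)).all (fun p => !(pyIsVowel p.1 == pyIsVowel p.2))) then false
  else decide (PySem.Set.len (PySem.Set.ofList gaps) ≤ 1)

-- ===== PRECONDITION & SPEC =====
def Spec_is_authentic_skewer (seq : String) (out : Bool) : Prop := out = is_authentic_skewer_alt seq
instance (seq : String) (out : Bool) : Decidable (Spec_is_authentic_skewer seq out) := by unfold Spec_is_authentic_skewer; infer_instance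

-- ===== CLAIM (what is proved, stated in full; the proofs are below) =====
def Claim_equal_is_authentic_skewer : Prop := ∀ (seq : String), Dom_is_authentic_skewer seq → Spec_is_authentic_skewer seq (is_authentic_skewer seq)

-- ===== LEMMAS AND PROOFS =====

-- gaps emitted while scanning after a letter, carrying the running dash count
def gapsAfter : List Char → Int → List Int
  | [], _ => []
  | c :: t, d =>
    let d' := if c == '-' then d + 1 else d
    if pyIsLetter c then d' :: gapsAfter t 0 else gapsAfter t d'

-- gaps of the whole string: skip to the first letter, then gapsAfter
def gapsFrom : List Char → List Int
  | [] => []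
  | c :: t => if pyIsLetter c then gapsAfter t 0 else gapsFrom t

theorem letter_ne_dash {c : Char} (h : pyIsLetter c = true) : (c == '-') = false := by
  by_cases hc : c = '-'
  · subst hc; exact absurd h (by decide)
  · exact beq_eq_false_iff_ne.mpr hc

theorem innerScan_none {t : List Char} {c r : Int} (h : innerScan t c = (none, r)) :
    t.any pyIsLetter = false := by
  induction t generalizing c with
  | nil => rfl
  | cons ch rest ih =>
    simp only [innerScan] at h
    by_cases hl : pyIsLetter ch = true
    · simp [hl] at h
    · simp only [List.any_cons, Bool.eq_false_iff.mpr hl, Bool.false_or]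
      exact ih (by simpa [hl] using h)

theorem skloop_no_letter {t : List Char} (h : t.any pyIsLetter = false) (c : Int) (hd : List Int) :
    skloop t c hd = hd := by
  induction t generalizing c hd with
  | nil => rfl
  | cons ch rest ih =>
    simp only [List.any_cons, Bool.or_eq_false_iff] at h
    simp only [skloop, h.1]
    exact ih h.2 _ _

theorem gapsAfter_innerScan (t : List Char) (c : Int) :
    gapsAfter t c = (match (innerScan t c).1 with
      | some g => g :: gapsFrom t
      | none => []) := by
  induction t generalizing c with
  | nil => rfl
  | cons d t' ih =>
    by_cases hl : pyIsLetter d = true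
    · simp only [gapsAfter, innerScan, gapsFrom, hl, letter_ne_dash hl, if_true]
    · have hd : pyIsLetter d = false := by simpa using hl
      simp only [gapsAfter, innerScan, gapsFrom, hd, Bool.false_eq_true, if_false]
      exact ih _

theorem skloop_eq (l : List Char) (h : List Int) : skloop l 0 h = h ++ gapsFrom l := by
  induction l generalizing h with
  | nil => simp [skloop, gapsFrom]
  | cons c t ih =>
    by_cases hl : pyIsLetter c = true
    · rcases hscan : innerScan t 0 with ⟨o, r⟩
      cases o with
      | some g =>
        have hgf : gapsFrom (c :: t) = g :: gapsFrom t := by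
          simp [gapsFrom, hl, gapsAfter_innerScan, hscan]
        simp only [skloop, hl, hscan, hgf, ih (h ++ [g])]
        simp
      | none =>
        have hgf : gapsFrom (c :: t) = [] := by
          simp [gapsFrom, hl, gapsAfter_innerScan, hscan]
        simp only [skloop, hl, hscan, hgf,
          skloop_no_letter (innerScan_none hscan)]
        simp
    · have hd : pyIsLetter c = false := by simpa using hl
      simp only [skloop, gapsFrom, hd, Bool.false_eq_true, if_false]
      exact ih h

theorem flag_eq (l : List Char) (b : Bool) :
    l.foldl (fun f i => if pyIsLetter i then false else f) b = (b && !(l.any pyIsLetter)) := by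
  induction l generalizing b with
  | nil => simp
  | cons c t ih =>
    simp only [List.foldl_cons, List.any_cons, ih]
    by_cases hl : pyIsLetter c = true <;> simp [hl]

theorem foldB_stripped (l : List Char) (st : List Char × List Int × Int × Bool × Bool) :
    (l.foldl bstep st).1 = st.1 ++ l.filter (fun c => !(c == '-')) := by
  induction l generalizing st with
  | nil => simp
  | cons c t ih =>
    simp only [List.foldl_cons, ih]
    by_cases hc : (c == '-') = true <;>
      by_cases hl : pyIsLetter c = true <;>
        simp [bstep, hc, hl, List.append_assoc]

theorem foldB_seen (l : List Char) (st : List Char × List Int × Int × Bool × Bool) :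
    (l.foldl bstep st).2.2.2.1 = (st.2.2.2.1 || l.any pyIsLetter) := by
  induction l generalizing st with
  | nil => simp
  | cons c t ih =>
    simp only [List.foldl_cons, ih]
    by_cases hl : pyIsLetter c = true <;> simp [bstep, hl]

theorem foldB_hasDash (l : List Char) (st : List Char × List Int × Int × Bool × Bool) :
    (l.foldl bstep st).2.2.2.2 = (st.2.2.2.2 || l.any (fun c => c == '-')) := by
  induction l generalizing st with
  | nil => simp
  | cons c t ih =>
    simp only [List.foldl_cons, ih]
    by_cases hc : (c == '-') = true <;>
      by_cases hl : pyIsLetter c = true <;>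
        simp [bstep, hc, hl]

theorem foldB_gaps_seen (l : List Char) (s : List Char) (g : List Int) (d : Int) (hd : Bool) :
    (l.foldl bstep (s, g, d, true, hd)).2.1 = g ++ gapsAfter l d := by
  induction l generalizing s g d hd with
  | nil => simp [gapsAfter]
  | cons c t ih =>
    by_cases hl : pyIsLetter c = true <;>
      simp [bstep, hl, gapsAfter, ih, List.append_assoc]

theorem foldB_gaps (l : List Char) (s : List Char) (g : List Int) (d : Int) (hd : Bool) :
    (l.foldl bstep (s, g, d, false, hd)).2.1 = g ++ gapsFrom l := by
  induction l generalizing s g d hd with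
  | nil => simp [gapsFrom]
  | cons c t ih =>
    by_cases hl : pyIsLetter c = true <;>
      simp [bstep, hl, gapsFrom, ih, foldB_gaps_seen]

theorem foldl_add_fixed {t : List Int} {s : PySem.Set Int} (h : ∀ x ∈ t, x ∈ s) :
    t.foldl PySem.Set.add s = s := by
  induction t generalizing s with
  | nil => rfl
  | cons a t ih =>
    have ha : PySem.Set.add s a = s := by
      have hm : a ∈ s := h a List.mem_cons_self
      simp [PySem.Set.add, hm]
    simp only [List.foldl_cons, ha]
    exact ih (fun x hx => h x (List.mem_cons_of_mem _ hx))

theorem allEq_set (xs : List Int) :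
    (match xs with
      | [] => true
      | h0 :: hs => hs.all (fun i => h0 == i)) =
    decide (PySem.Set.len (PySem.Set.ofList xs) ≤ 1) := by
  cases xs with
  | nil => rfl
  | cons h0 hs =>
    rw [Bool.eq_iff_iff]
    simp only [List.all_eq_true, decide_eq_true_eq]
    constructor
    · intro H
      have hall : ∀ x ∈ hs, x ∈ ([h0] : PySem.Set Int) := by
        intro x hx
        have := H x hx
        simp only [beq_iff_eq] at this
        simp [this]
      have : PySem.Set.ofList (h0 :: hs) = [h0] := by
        rw [PySem.Set.ofList_eq_foldl]
        simp only [List.foldl_cons]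
        have h1 : PySem.Set.add [] h0 = [h0] := rfl
        rw [h1, foldl_add_fixed hall]
      simp [this, PySem.Set.len]
    · intro H i hi
      have hmem : i ∈ PySem.Set.ofList (h0 :: hs) :=
        (PySem.Set.mem_ofList _ _).mpr (List.mem_cons_of_mem _ hi)
      have hmem0 : h0 ∈ PySem.Set.ofList (h0 :: hs) :=
        (PySem.Set.mem_ofList _ _).mpr (List.mem_cons_self)
      have hlen : (PySem.Set.ofList (h0 :: hs)).length ≤ 1 := by
        simpa [PySem.Set.len, Int.ofNat_le] using H
      cases hE : PySem.Set.ofList (h0 :: hs) with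
      | nil => rw [hE] at hmem0; exact absurd hmem0 (by simp)
      | cons a t =>
        rw [hE] at hmem hmem0 hlen
        have ht : t = [] := by
          cases t with
          | nil => rfl
          | cons b u => simp at hlen
        subst ht
        simp only [List.mem_singleton] at hmem hmem0
        simp [hmem, hmem0]

theorem bool_pair (a b : Bool) : (!((a && b) || (!a && !b))) = (!(a == b)) := by
  cases a <;> cases b <;> rfl

theorem range_zip (s : List Char) :
    (PySem.List.pyRange 1 (s.length : Int) 1).all (fun i =>
      !((pyIsVowel (PySem.List.pyGetD s (i-1) ' ') && pyIsVowel (PySem.List.pyGetD s i ' ')) ||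
        (!pyIsVowel (PySem.List.pyGetD s (i-1) ' ') && !pyIsVowel (PySem.List.pyGetD s i ' ')))) =
    (s.zip (s.drop 1)).all (fun p => !(pyIsVowel p.1 == pyIsVowel p.2)) := by
  rw [Bool.eq_iff_iff]
  simp only [List.all_eq_true]
  have key : ∀ (i : Int), 1 ≤ i → i < (s.length : Int) →
      ∀ (k : Nat), (hk1 : k + 1 < s.length) → i = (k : Int) + 1 →
      (!((pyIsVowel (PySem.List.pyGetD s (i-1) ' ') && pyIsVowel (PySem.List.pyGetD s i ' ')) ||
        (!pyIsVowel (PySem.List.pyGetD s (i-1) ' ') && !pyIsVowel (PySem.List.pyGetD s i ' ')))) =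
      (!(pyIsVowel s[k] == pyIsVowel s[k+1])) := by
    intro i h1 h2 k hk1 hik
    subst hik
    have e1 : PySem.List.pyGetD s ((k : Int) + 1 - 1) ' ' = s[k] := by
      rw [show ((k : Int) + 1 - 1) = (k : Int) by ring,
        PySem.List.pyGetD_eq_getElem s ' ' (by positivity) (by exact_mod_cast Nat.lt_of_succ_lt hk1)]
      simp
    have e2 : PySem.List.pyGetD s ((k : Int) + 1) ' ' = s[k+1] := by
      rw [show ((k : Int) + 1) = ((k + 1 : Nat) : Int) by push_cast; ring,
        PySem.List.pyGetD_eq_getElem s ' ' (by positivity) (by exact_mod_cast hk1)]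
      simp
    rw [e1, e2, bool_pair]
  constructor
  · intro H p hp
    obtain ⟨k, hk, hpk⟩ := List.mem_iff_getElem.mp hp
    have hk1 : k + 1 < s.length := by
      simp only [List.length_zip, List.length_drop, lt_min_iff] at hk
      omega
    have hmem : ((k : Int) + 1) ∈ PySem.List.pyRange 1 (s.length : Int) 1 := by
      rw [PySem.List.mem_pyRange_one]
      constructor <;> [omega; exact_mod_cast hk1]
    have := H _ hmem
    rw [key ((k : Int) + 1) (by omega) (by exact_mod_cast hk1) k hk1 rfl] at this
    have hpp : p = (s[k], s[k+1]) := by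
      rw [← hpk, List.getElem_zip]
      congr 1
      rw [List.getElem_drop]
      congr 1
      omega
    rw [hpp]
    simpa using this
  · intro H i hi
    rw [PySem.List.mem_pyRange_one] at hi
    obtain ⟨h1, h2⟩ := hi
    have hkex : ∃ k : Nat, i = (k : Int) + 1 ∧ k + 1 < s.length := by
      refine ⟨(i - 1).toNat, by omega, ?_⟩
      omega
    obtain ⟨k, hik, hk1⟩ := hkex
    rw [key i h1 h2 k hk1 hik]
    have hzlen : k < (s.zip (s.drop 1)).length := by
      simp only [List.length_zip, List.length_drop, lt_min_iff]
      omega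
    have := H (s[k], s[k+1]) (by
      rw [List.mem_iff_getElem]
      exact ⟨k, hzlen, by rw [List.getElem_zip]; congr 1; rw [List.getElem_drop]; congr 1; omega⟩)
    simpa using this

theorem vowel_order_eq_zip (l : List Char) :
    vowel_order l =
      ((l.filter (fun c => !(c == '-'))).zip ((l.filter (fun c => !(c == '-'))).drop 1)).all
        (fun p => !(pyIsVowel p.1 == pyIsVowel p.2)) := by
  unfold vowel_order
  exact range_zip _

theorem start_end_eq (l : List Char) (hne : l ≠ []) :
    start_end l = !(pyIsVowel (PySem.List.pyGetD l 0 ' ') || pyIsVowel (PySem.List.pyGetD l (-1) ' ')) := by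
  cases l with
  | nil => exact absurd rfl hne
  | cons a t =>
    unfold start_end
    rw [PySem.List.pyGet?_zero_cons, PySem.List.pyGet?_neg_one,
      List.getLast?_eq_getLast (l := a :: t) (by simp),
      PySem.List.pyGetD_zero_cons,
      PySem.List.pyGetD_neg_one (a :: t) ' ' (by simp)]
    cases h1 : pyIsVowel a <;> cases h2 : pyIsVowel ((a :: t).getLast (by simp)) <;>
      simp [h1, h2]

-- ===== VERDICT (by name: the statement is the Claim_ definition above) =====
theorem skewer_count_eq (l : List Char) :
    skewer_count l = decide (PySem.Set.len (PySem.Set.ofList (gapsFrom l)) ≤ 1) := by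
  unfold skewer_count
  rw [skloop_eq]
  simp only [List.nil_append]
  exact allEq_set (gapsFrom l)

theorem any_dash (l : List Char) : l.any (fun c => c == '-') = l.contains '-' := by
  rw [List.contains_eq_any_beq]
  simp [BEq.comm]

theorem is_authentic_skewer_spec : Claim_equal_is_authentic_skewer := by
  intro seq _
  unfold Spec_is_authentic_skewer is_authentic_skewer is_authentic_skewer_alt
  simp only [flag_eq, Bool.true_and, foldB_stripped, foldB_seen, foldB_hasDash, foldB_gaps,
    List.nil_append, Bool.false_or, any_dash]
  by_cases hA : (seq.toList.any pyIsLetter) = true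
  · by_cases hD : (seq.toList.contains '-') = true
    · have hne : seq.toList ≠ [] :=
        List.ne_nil_of_mem (List.contains_iff_mem.mp hD)
      rw [start_end_eq seq.toList hne, vowel_order_eq_zip, skewer_count_eq]
      simp only [hA, hD, Bool.not_true, Bool.false_or, Bool.or_false, if_false]
      cases hV : (pyIsVowel (PySem.List.pyGetD seq.toList 0 ' ') ||
          pyIsVowel (PySem.List.pyGetD seq.toList (-1) ' ')) <;>
        cases hZ : ((seq.toList.filter (fun c => !(c == '-'))).zip
            ((seq.toList.filter (fun c => !(c == '-'))).drop 1)).all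
            (fun p => !(pyIsVowel p.1 == pyIsVowel p.2)) <;>
          simp [hV, hZ]
    · have hD2 : ¬ ('-' ∈ seq.toList) := fun hm => hD (List.contains_iff_mem.mpr hm)
      simp [hA, hD2]
  · simp [hA]
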